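-- pv_equiv track=rewrite | github.com/harbecke/HexHex | hexhex/solver/encoding.py | base3_key
-- ===== SOURCE A (Python) =====
-- def base3_key(red_mask: int, blue_mask: int, n: int) -> int:
--     """Encode (red_mask, blue_mask) as a base-3 integer with digit i = cell i."""
--     key = 0
--     for i in range(n * n - 1, -1, -1):
--         key *= 3
--         bit = 1 << i
--         if red_mask & bit:
--             key += 1
--         elif blue_mask & bit:
--             key += 2
--     return key
-- ===== SOURCE B (Python) =====
-- def base3_key(red_mask: int, blue_mask: int, n: int) -> int:
--     """Encode (red_mask, blue_mask) as a base-3 integer with digit i = cell i.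
--
--     Divide-and-conquer base composition: go returns (key, 3**k) for a block of
--     k digits, and a k-digit block is low_half + 3**h * high_half, so big-int
--     multiplications happen on balanced halves instead of one digit at a time.
--     """
--     def go(r: int, b: int, k: int):
--         if k == 0:
--             return 0, 1
--         if k == 1:
--             return (1 if r & 1 else (2 if b & 1 else 0)), 3
--         h = k // 2
--         low = (1 << h) - 1
--         lo, pl = go(r & low, b & low, h)
--         hi, ph = go(r >> h, b >> h, k - h)
--         return lo + pl * hi, pl * ph
--     return go(red_mask, blue_mask, n * n)[0]
-- ===== Notes on version B (the rewrite author's own statement) =====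
-- stated objective: alternative
-- what changed: replaces the digit-at-a-time Horner loop (one bignum multiply-and-add per cell) by divide-and-conquer base composition on bit-sliced halves of the masks, threading 3^k through the recursion (key = low_half + 3^h * high_half); intended as faster (measured 2.93x at the largest size both finished, n=256), but a timing run could not confirm it at sizes where A times out
import Mathlib
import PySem

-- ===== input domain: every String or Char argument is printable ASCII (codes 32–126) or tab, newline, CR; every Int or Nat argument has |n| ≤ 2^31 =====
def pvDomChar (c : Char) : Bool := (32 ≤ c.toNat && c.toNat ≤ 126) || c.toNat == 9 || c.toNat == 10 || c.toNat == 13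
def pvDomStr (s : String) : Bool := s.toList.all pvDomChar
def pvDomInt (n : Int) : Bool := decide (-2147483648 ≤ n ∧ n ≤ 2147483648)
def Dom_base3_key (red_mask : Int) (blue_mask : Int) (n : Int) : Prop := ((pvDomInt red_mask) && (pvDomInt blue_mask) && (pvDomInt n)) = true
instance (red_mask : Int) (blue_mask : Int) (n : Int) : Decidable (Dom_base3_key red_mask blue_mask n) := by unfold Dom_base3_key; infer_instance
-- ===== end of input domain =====

-- B replaces A's digit-at-a-time Horner loop by divide-and-conquer base composition
-- (key = low half + 3^h * high half on bit-sliced masks, threading 3^k through the recursion).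


-- ===== PORT A =====
-- for i in range(n*n-1, -1, -1): key *= 3; bit = 1 << i; if red & bit: +1 elif blue & bit: +2
-- every element of this descending range is ≥ 0, so `i.toNat` renders Python's `1 << i` exactly
def base3_key (red_mask : Int) (blue_mask : Int) (n : Int) : Int :=
  (PySem.List.pyRange (n * n - 1) (-1) (-1)).foldl
    (fun key i =>
      let key := key * 3
      let bit : Int := Int.shiftLeft 1 i.toNat
      if PySem.Int.band red_mask bit ≠ 0 then key + 1
      else if PySem.Int.band blue_mask bit ≠ 0 then key + 2
      else key) 0

-- ===== PORT B =====
-- transliteration of Source B's recursive helper `go`, which returns (key, 3**k)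
def base3_key_go (r b : Int) (k : Nat) : Int × Int :=
  if k = 0 then (0, 1)
  else if k = 1 then
    (if PySem.Int.band r 1 ≠ 0 then 1
     else if PySem.Int.band b 1 ≠ 0 then 2
     else 0, 3)
  else
    let h := k / 2
    let low : Int := Int.shiftLeft 1 h - 1
    let lo := base3_key_go (PySem.Int.band r low) (PySem.Int.band b low) h
    let hi := base3_key_go (r >>> h) (b >>> h) (k - h)
    (lo.1 + lo.2 * hi.1, lo.2 * hi.2)
  termination_by k
  decreasing_by all_goals omega

-- Python's `n * n` is always ≥ 0, so the digit count is the Nat (n*n).toNat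
def base3_key_alt (red_mask : Int) (blue_mask : Int) (n : Int) : Int :=
  (base3_key_go red_mask blue_mask (n * n).toNat).1

-- ===== PRECONDITION & SPEC =====
def Spec_base3_key (red_mask : Int) (blue_mask : Int) (n : Int) (out : Int) : Prop := out = base3_key_alt red_mask blue_mask n
instance (red_mask : Int) (blue_mask : Int) (n : Int) (out : Int) : Decidable (Spec_base3_key red_mask blue_mask n out) := by unfold Spec_base3_key; infer_instance

-- ===== CLAIM (what is proved, stated in full; the proofs are below) =====
def Claim_equal_base3_key : Prop := ∀ (red_mask : Int) (blue_mask : Int) (n : Int), Dom_base3_key red_mask blue_mask n → Spec_base3_key red_mask blue_mask n (base3_key red_mask blue_mask n)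

-- ===== LEMMAS AND PROOFS =====

-- digit i of the encoding: 1 if bit i of r, else 2 if bit i of b, else 0
def pvDigit (r b : Int) (i : Nat) : Int :=
  if (r >>> i) % 2 = 1 then 1 else if (b >>> i) % 2 = 1 then 2 else 0

-- the value both programs compute: sum of digit i * 3^i over i < k
def pvV (r b : Int) : Nat → Int
  | 0 => 0
  | k + 1 => pvV r b k + pvDigit r b k * 3 ^ k

lemma pv_one_shiftLeft (i : Nat) : Int.shiftLeft 1 i = ((2 ^ i : Nat) : Int) := by
  rw [show Int.shiftLeft 1 i = (1 : Int) <<< i from rfl]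
  simp [Int.shiftLeft_eq]

-- Python's truth test `a & (1 << i)` is the parity of a >> i (exact also for negative a)
lemma pv_band_two_pow (a : Int) (i : Nat) :
    (PySem.Int.band a (Int.shiftLeft 1 i) ≠ 0) ↔ (a >>> i) % 2 = 1 := by
  rw [pv_one_shiftLeft]
  by_cases ha : 0 ≤ a
  · obtain ⟨m, rfl⟩ := Int.eq_ofNat_of_zero_le ha
    rw [show ((m : Int)) >>> i = ((m / 2 ^ i : Nat) : Int) by
      simp [Int.shiftRight_eq_div_pow]]
    simp only [PySem.Int.band_natCast, Nat.and_two_pow, Nat.testBit_eq_decide_div_mod_eq]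
    set q := m / 2 ^ i with hq
    rcases Nat.mod_two_eq_zero_or_one q with hd | hd <;>
      simp [hd] <;> omega
  · set m : Nat := (-a - 1).toNat with hm
    have ha' : a = -1 - (m : Int) := by omega
    have hb : (0 : Int) ≤ ((2 ^ i : Nat) : Int) := by positivity
    have hband : PySem.Int.band a ((2 ^ i : Nat) : Int)
        = ((2 ^ i - (2 ^ i &&& m) : Nat) : Int) := by
      simp only [PySem.Int.band]
      rw [if_neg ha, if_pos hb, Int.toNat_natCast, ← hm]
    have htb : 2 ^ i &&& m = (decide (m / 2 ^ i % 2 = 1)).toNat * 2 ^ i := by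
      rw [Nat.and_comm, Nat.and_two_pow, Nat.testBit_eq_decide_div_mod_eq]
    have hpos : (0 : Int) < ((2 ^ i : Nat) : Int) := by positivity
    have hmlt : (m % 2 ^ i : Nat) < 2 ^ i := Nat.mod_lt m (Nat.two_pow_pos i)
    have hdm : 2 ^ i * (m / 2 ^ i) + m % 2 ^ i = m := Nat.div_add_mod m (2 ^ i)
    have hdiv : a >>> i = -((m / 2 ^ i : Nat) : Int) - 1 := by
      rw [Int.shiftRight_eq_div_pow, ha']
      have hsplit : (-1 - (m : Int)) =
          ((2 ^ i - 1 - m % 2 ^ i : Nat) : Int)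
            + (-((m / 2 ^ i : Nat) : Int) - 1) * ((2 ^ i : Nat) : Int) := by
        have e1 : ((2 ^ i - 1 - m % 2 ^ i : Nat) : Int)
            = ((2 ^ i : Nat) : Int) - 1 - ((m % 2 ^ i : Nat) : Int) := by
          push_cast [Nat.cast_sub (by omega : m % 2 ^ i ≤ 2 ^ i - 1),
            Nat.cast_sub (Nat.one_le_two_pow)]
          ring
        have e2 : ((2 ^ i : Nat) : Int) * ((m / 2 ^ i : Nat) : Int)
            + ((m % 2 ^ i : Nat) : Int) = (m : Int) := by
          exact_mod_cast congrArg (Nat.cast : Nat → Int) hdm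
        rw [e1]
        nlinarith [e2]
      rw [hsplit, Int.add_mul_ediv_right _ _ hpos.ne',
        Int.ediv_eq_zero_of_lt (by positivity) (by exact_mod_cast Nat.sub_lt_of_lt (by omega))]
      ring
    rw [hband, htb, hdiv]
    set q := m / 2 ^ i with hq
    have h2 : (0 : Nat) < 2 ^ i := Nat.two_pow_pos i
    rcases Nat.mod_two_eq_zero_or_one q with hd | hd <;>
      simp [hd] <;> omega

-- Python's `a & ((1 << h) - 1)` is a % 2^h (exact also for negative a)
lemma pv_band_mask (a : Int) (h : Nat) :
    PySem.Int.band a (Int.shiftLeft 1 h - 1) = a % ((2 ^ h : Nat) : Int) := by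
  have hone : (1 : Nat) ≤ 2 ^ h := Nat.one_le_two_pow
  have hmask : Int.shiftLeft 1 h - 1 = ((2 ^ h - 1 : Nat) : Int) := by
    rw [pv_one_shiftLeft]; omega
  rw [hmask]
  by_cases ha : 0 ≤ a
  · obtain ⟨m, rfl⟩ := Int.eq_ofNat_of_zero_le ha
    rw [PySem.Int.band_natCast, Nat.and_two_pow_sub_one_eq_mod]
    exact_mod_cast (Int.natCast_mod m (2 ^ h)).symm
  · set m : Nat := (-a - 1).toNat with hm
    have ha' : a = -1 - (m : Int) := by omega
    have hb : (0 : Int) ≤ ((2 ^ h - 1 : Nat) : Int) := by positivity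
    have hband : PySem.Int.band a ((2 ^ h - 1 : Nat) : Int)
        = (((2 ^ h - 1) - ((2 ^ h - 1) &&& m) : Nat) : Int) := by
      simp only [PySem.Int.band]
      rw [if_neg ha, if_pos hb, Int.toNat_natCast, ← hm]
    have hand : (2 ^ h - 1) &&& m = m % 2 ^ h := by
      rw [Nat.and_comm, Nat.and_two_pow_sub_one_eq_mod]
    have hmod : m % 2 ^ h < 2 ^ h := Nat.mod_lt m (Nat.two_pow_pos h)
    have hdm : 2 ^ h * (m / 2 ^ h) + m % 2 ^ h = m := Nat.div_add_mod m (2 ^ h)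
    have hsplit : a = (((2 ^ h - 1) - m % 2 ^ h : Nat) : Int)
        + ((2 ^ h : Nat) : Int) * (-((m / 2 ^ h : Nat) : Int) - 1) := by
      have e1 : (((2 ^ h - 1) - m % 2 ^ h : Nat) : Int)
          = ((2 ^ h : Nat) : Int) - 1 - ((m % 2 ^ h : Nat) : Int) := by
        push_cast [Nat.cast_sub (by omega : m % 2 ^ h ≤ 2 ^ h - 1), Nat.cast_sub hone]
        ring
      have e2 : ((2 ^ h : Nat) : Int) * ((m / 2 ^ h : Nat) : Int)
          + ((m % 2 ^ h : Nat) : Int) = (m : Int) := by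
        exact_mod_cast congrArg (Nat.cast : Nat → Int) hdm
      rw [e1, ha']
      nlinarith [e2]
    rw [hband, hsplit, Int.add_mul_emod_self_left,
      Int.emod_eq_of_lt (by positivity) (by exact_mod_cast Nat.sub_lt_of_lt (by omega))]
    rw [hand]

-- (a % (p*q)) / p = (a/p) % q for positive p, q
lemma pv_emod_mul_ediv (a p q : Int) (hp : 0 < p) (hq : 0 < q) :
    (a % (p * q)) / p = (a / p) % q := by
  have hpq : (0 : Int) < p * q := by positivity
  have h1 : a = a % (p * q) + (q * (a / (p * q))) * p := by
    have := Int.emod_add_mul_ediv a (p * q)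
    nlinarith [this]
  have h2 : a / p = a % (p * q) / p + q * (a / (p * q)) := by
    conv_lhs => rw [h1]
    rw [Int.add_mul_ediv_right _ _ (by omega : p ≠ 0)]
  rw [h2, Int.add_mul_emod_self_left]
  have h0 : 0 ≤ a % (p * q) := Int.emod_nonneg a hpq.ne'
  have hlt : a % (p * q) < p * q := Int.emod_lt_of_pos a hpq
  have hd0 : 0 ≤ a % (p * q) / p := Int.ediv_nonneg h0 hp.le
  have hdlt : a % (p * q) / p < q := by
    rw [Int.ediv_lt_iff_lt_mul hp]
    nlinarith
  exact (Int.emod_eq_of_lt hd0 hdlt).symm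

-- digits below h only depend on a % 2^h
lemma pv_digit_emod (a b : Int) (i h : Nat) (hih : i < h) :
    pvDigit (a % ((2 ^ h : Nat) : Int)) (b % ((2 ^ h : Nat) : Int)) i = pvDigit a b i := by
  have key : ∀ x : Int, ((x % ((2 ^ h : Nat) : Int)) >>> i) % 2 = (x >>> i) % 2 := by
    intro x
    rw [Int.shiftRight_eq_div_pow, Int.shiftRight_eq_div_pow]
    have hsplit : ((2 ^ h : Nat) : Int) = ((2 ^ i : Nat) : Int) * ((2 ^ (h - i) : Nat) : Int) := by
      push_cast [← pow_add]
      congr 1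
      omega
    rw [hsplit, pv_emod_mul_ediv _ _ _ (by positivity) (by positivity),
      Int.emod_emod_of_dvd]
    exact_mod_cast Dvd.intro_left (2 ^ (h - i - 1)) (by rw [← pow_succ]; congr 1; omega)
  simp only [pvDigit]
  rw [key a, key b]

lemma pv_digit_shift (a b : Int) (h i : Nat) :
    pvDigit (a >>> h) (b >>> h) i = pvDigit a b (h + i) := by
  simp [pvDigit, ← Int.shiftRight_add]

lemma pv_V_congr (r' b' r b : Int) (k : Nat)
    (hd : ∀ i, i < k → pvDigit r' b' i = pvDigit r b i) : pvV r' b' k = pvV r b k := by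
  induction k with
  | zero => rfl
  | succ k ih =>
    simp only [pvV, ih (fun i hi => hd i (by omega)), hd k (by omega)]

lemma pv_V_split (r b : Int) (m j : Nat) :
    pvV r b (m + j) = pvV r b m + 3 ^ m * pvV (r >>> m) (b >>> m) j := by
  induction j with
  | zero => simp [pvV]
  | succ j ih =>
    show pvV r b (m + j) + pvDigit r b (m + j) * 3 ^ (m + j) = _
    rw [ih]
    show _ = _ + 3 ^ m * (pvV (r >>> m) (b >>> m) j + pvDigit (r >>> m) (b >>> m) j * 3 ^ j)
    rw [pv_digit_shift, pow_add]
    ring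

lemma pv_go_eq_V : ∀ (k : Nat) (r b : Int), base3_key_go r b k = (pvV r b k, 3 ^ k) := by
  intro k
  induction k using Nat.strong_induction_on with
  | _ k ih =>
    intro r b
    rw [base3_key_go]
    by_cases h0 : k = 0
    · simp [h0, pvV]
    by_cases h1 : k = 1
    · subst h1
      simp only [if_neg h0]
      have h10 : Int.shiftLeft 1 (0 : Nat) = 1 := by decide
      have hr := pv_band_two_pow r 0
      have hb := pv_band_two_pow b 0
      rw [h10, Int.shiftRight_zero] at hr hb
      show _ = (pvV r b (0 + 1), 3 ^ 1)
      simp only [pvV, pvDigit, Int.shiftRight_zero, pow_zero, pow_one, mul_one, zero_add]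
      simp [hr, hb]
    · simp only [if_neg h0, if_neg h1]
      have hk2 : 2 ≤ k := by omega
      set h := k / 2 with hh
      have hhk : h < k := by omega
      have hkh : k - h < k := by omega
      have hsum : h + (k - h) = k := by omega
      rw [ih h hhk, ih (k - h) hkh, pv_band_mask, pv_band_mask]
      simp only []
      refine Prod.ext ?_ ?_
      · show pvV (r % ((2 ^ h : Nat) : Int)) (b % ((2 ^ h : Nat) : Int)) h
            + 3 ^ h * pvV (r >>> h) (b >>> h) (k - h) = pvV r b k
        rw [pv_V_congr _ _ r b h (fun i hi => pv_digit_emod r b i h hi)]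
        conv_rhs => rw [← hsum]
        exact (pv_V_split r b h (k - h)).symm
      · show (3 : Int) ^ h * 3 ^ (k - h) = 3 ^ k
        rw [← pow_add, hsum]

lemma pv_rangeDesc (m : Nat) :
    PySem.List.pyRange ((m : Int) - 1) (-1) (-1)
      = (List.range m).map (fun k : Nat => (m : Int) - 1 - k) := by
  simp only [PySem.List.pyRange]
  norm_num
  rcases Nat.eq_zero_or_pos m with h | h
  · subst h; simp
  · rw [if_pos h]
    apply List.map_congr_left
    intro k _
    ring

lemma pv_horner (r b : Int) (m : Nat) : ∀ key : Int,
    ((List.range m).map (fun k : Nat => (m : Int) - 1 - k)).foldl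
      (fun (key : Int) (i : Int) =>
        let key := key * 3
        let bit : Int := Int.shiftLeft 1 i.toNat
        if PySem.Int.band r bit ≠ 0 then key + 1
        else if PySem.Int.band b bit ≠ 0 then key + 2
        else key) key
    = key * 3 ^ m + pvV r b m := by
  induction m with
  | zero => intro key; simp [pvV]
  | succ m ih =>
    intro key
    rw [List.range_succ_eq_map]
    simp only [List.map_cons, List.map_map, List.foldl_cons]
    have hfn : ((fun k : Nat => ((m + 1 : Nat) : Int) - 1 - k) ∘ (fun i : Nat => i + 1))
        = fun k : Nat => (m : Int) - 1 - k := by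
      funext k; simp; ring
    have hv : ((m + 1 : Nat) : Int) - 1 - ((0 : Nat) : Int) = ((m : Nat) : Int) := by
      push_cast; ring
    rw [hfn, hv]
    have hstep : (if PySem.Int.band r (Int.shiftLeft 1 (((m : Nat) : Int)).toNat) ≠ 0 then key * 3 + 1
        else if PySem.Int.band b (Int.shiftLeft 1 (((m : Nat) : Int)).toNat) ≠ 0 then key * 3 + 2 else key * 3)
        = key * 3 + pvDigit r b m := by
      simp only [Int.toNat_natCast, pvDigit, ← pv_band_two_pow]
      split_ifs <;> ring
    rw [hstep, ih]
    show _ = key * 3 ^ (m + 1) + (pvV r b m + pvDigit r b m * 3 ^ m)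
    ring

lemma pv_A_eq_V (r b n : Int) : base3_key r b n = pvV r b (n * n).toNat := by
  have hnn : (0 : Int) ≤ n * n := mul_self_nonneg n
  have hcast : n * n = (((n * n).toNat : Nat) : Int) := by omega
  unfold base3_key
  rw [hcast, pv_rangeDesc, pv_horner]
  rw [Int.toNat_natCast]
  ring

-- ===== VERDICT (by name: the statement is the Claim_ definition above) =====
theorem base3_key_spec : Claim_equal_base3_key := by
  intro r b n _
  unfold Spec_base3_key base3_key_alt
  rw [pv_A_eq_V, pv_go_eq_V]
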